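-- pv_equiv track=rewrite | github.com/NASA-Planetary-Science/AmesCAP | amescap/Script_utils.py | replace_dims
-- ===== SOURCE A (Python) =====
-- def replace_dims(Ncvar_dim, vert_dim_name=None):
--     """
--     Updates the name of the variable dimension to match the format of
--     the new NASA Ames Mars GCM output files.
--
--     :param Ncvar_dim: netCDF variable dimensions
--         (e.g., ``f_Ncdf.variables["temp"].dimensions``)
--     :type Ncvar_dim: str
--     :param vert_dim_name: the vertical dimension if it is ambiguous
--         (``pstd``, ``zstd``, or ``zagl``). Defaults to None
--     :type vert_dim_name: str, optional
--     :return: updated dimensions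
--     :rtype: str
--     """
--     # Set input dictionary options recognizable as MGCM variables
--     lat_dic = ["lat", "lats", "latitudes", "latitude"]
--     lon_dic = ["lon", "lon", "longitude", "longitudes"]
--     lev_dic = ["pressure", "altitude"]
--     areo_dic = ["ls"]
--
--     # Set the desired output names
--     dims_out = list(Ncvar_dim).copy()
--     for ii, idim in enumerate(Ncvar_dim):
--         # Rename axes
--         if idim in lat_dic: dims_out[ii] = "lat"
--         if idim in lon_dic: dims_out[ii] = "lon"
--         if idim in lev_dic:
--             if vert_dim_name is None:
--                 # Vertical coordinate: If no input provided, assume it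
--                 # is standard pressure ``pstd``
--                 dims_out[ii] = "pstd"
--             else:
--                 # Use provided dimension
--                 dims_out[ii] = vert_dim_name
--     return tuple(dims_out)
-- ===== SOURCE B (Python) =====
-- def replace_dims(Ncvar_dim, vert_dim_name=None):
--     # Staged whole-list substitution passes instead of a single loop with
--     # three per-element branches: each pass rewrites one category over the
--     # whole sequence. Correct because the three recognized-name sets are
--     # disjoint and no pass produces a name a later pass rewrites.
--     def sub(seq, names, target):
--         return [target if d in names else d for d in seq]
--     dims = sub(Ncvar_dim, ("lat", "lats", "latitudes", "latitude"), "lat")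
--     dims = sub(dims, ("lon", "longitude", "longitudes"), "lon")
--     dims = sub(dims, ("pressure", "altitude"),
--                "pstd" if vert_dim_name is None else vert_dim_name)
--     return tuple(dims)
-- ===== Notes on version B (the rewrite author's own statement) =====
-- stated objective: simpler
-- what changed: Replaces A's single index-mutating enumerate loop with three per-element branches by three staged whole-list substitution passes (one generic helper applied per category), valid because the category name sets are disjoint and no pass creates a name a later pass rewrites.
import Mathlib
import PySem

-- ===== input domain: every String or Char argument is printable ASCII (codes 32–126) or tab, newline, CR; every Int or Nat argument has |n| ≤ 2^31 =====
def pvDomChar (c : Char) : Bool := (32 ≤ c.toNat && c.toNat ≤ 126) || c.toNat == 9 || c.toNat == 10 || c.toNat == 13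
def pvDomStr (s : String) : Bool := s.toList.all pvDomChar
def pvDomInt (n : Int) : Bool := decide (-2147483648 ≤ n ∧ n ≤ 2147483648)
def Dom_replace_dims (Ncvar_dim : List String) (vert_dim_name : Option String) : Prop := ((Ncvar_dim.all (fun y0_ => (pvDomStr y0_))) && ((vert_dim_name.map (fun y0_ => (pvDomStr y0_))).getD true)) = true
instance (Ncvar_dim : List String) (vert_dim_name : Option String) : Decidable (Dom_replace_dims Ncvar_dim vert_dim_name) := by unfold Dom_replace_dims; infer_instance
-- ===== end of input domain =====

-- B replaces A's single index-mutating loop with three staged whole-list substitution passes (objective: simpler; same cost).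


-- ===== PORT A =====
-- loop body of A: the three if-branches updating dims_out[ii]
def pvStepA (vert_dim_name : Option String) (dims_out : List String) (p : Int × String) : List String :=
  let ii := p.1
  let idim := p.2
  let dims_out := if idim ∈ (["lat", "lats", "latitudes", "latitude"] : List String) then dims_out.set ii.toNat "lat" else dims_out
  let dims_out := if idim ∈ (["lon", "lon", "longitude", "longitudes"] : List String) then dims_out.set ii.toNat "lon" else dims_out
  if idim ∈ (["pressure", "altitude"] : List String) then
    match vert_dim_name with
    | none => dims_out.set ii.toNat "pstd"
    | some v => dims_out.set ii.toNat v
  else dims_out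

def replace_dims (Ncvar_dim : List String) (vert_dim_name : Option String) : List String :=
  -- dims_out = list(Ncvar_dim).copy(); for ii, idim in enumerate(Ncvar_dim): <pvStepA>
  (PySem.List.enumerate Ncvar_dim).foldl (pvStepA vert_dim_name) Ncvar_dim

-- ===== PORT B =====
-- helper 'sub' of Source B: one whole-list substitution pass for one category
def pvSub (seq : List String) (names : List String) (target : String) : List String :=
  seq.map (fun d => if d ∈ names then target else d)

def replace_dims_alt (Ncvar_dim : List String) (vert_dim_name : Option String) : List String :=
  let dims := pvSub Ncvar_dim ["lat", "lats", "latitudes", "latitude"] "lat"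
  let dims := pvSub dims ["lon", "longitude", "longitudes"] "lon"
  pvSub dims ["pressure", "altitude"]
    (match vert_dim_name with | none => "pstd" | some v => v)

-- ===== PRECONDITION & SPEC =====
def Spec_replace_dims (Ncvar_dim : List String) (vert_dim_name : Option String) (out : List String) : Prop := out = replace_dims_alt Ncvar_dim vert_dim_name
instance (Ncvar_dim : List String) (vert_dim_name : Option String) (out : List String) : Decidable (Spec_replace_dims Ncvar_dim vert_dim_name out) := by unfold Spec_replace_dims; infer_instance

-- ===== CLAIM (what is proved, stated in full; the proofs are below) =====
def Claim_equal_replace_dims : Prop := ∀ (Ncvar_dim : List String) (vert_dim_name : Option String), Dom_replace_dims Ncvar_dim vert_dim_name → Spec_replace_dims Ncvar_dim vert_dim_name (replace_dims Ncvar_dim vert_dim_name)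

-- ===== LEMMAS AND PROOFS =====

-- the per-element value A's loop writes at each position
def pvStep (vert_dim_name : Option String) (x : String) : String :=
  let a := if x ∈ (["lat", "lats", "latitudes", "latitude"] : List String) then "lat" else x
  let b := if x ∈ (["lon", "lon", "longitude", "longitudes"] : List String) then "lon" else a
  if x ∈ (["pressure", "altitude"] : List String) then
    match vert_dim_name with | none => "pstd" | some v => v
  else b

theorem pv_set_at_len (done : List String) (x y : String) (xs : List String) :
    (done ++ x :: xs).set done.length y = done ++ y :: xs := by
  induction done with
  | nil => simp
  | cons h t ih => simp [ih]

theorem pvStepA_eq (vert_dim_name : Option String) (done : List String) (x : String) (t : List String) :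
    pvStepA vert_dim_name (done ++ x :: t) ((done.length : Int), x)
      = (done ++ [pvStep vert_dim_name x]) ++ t := by
  simp only [pvStepA, pvStep, Int.toNat_natCast]
  split_ifs <;> cases vert_dim_name <;> simp only [pv_set_at_len, List.append_assoc, List.singleton_append]

theorem pv_foldA (vert_dim_name : Option String) (xs : List String) : ∀ done : List String,
    (PySem.List.enumerate xs (done.length : Int)).foldl (pvStepA vert_dim_name) (done ++ xs)
      = done ++ xs.map (pvStep vert_dim_name) := by
  induction xs with
  | nil => intro done; simp [PySem.List.enumerate_nil]
  | cons x t ih =>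
    intro done
    rw [PySem.List.enumerate_cons, List.foldl_cons, pvStepA_eq]
    have harith : (done.length : Int) + 1 = (((done ++ [pvStep vert_dim_name x]).length : Nat) : Int) := by
      simp
    rw [harith, ih (done ++ [pvStep vert_dim_name x])]
    simp

-- the three staged passes agree with A's per-element value, pointwise
theorem pv_point (vert_dim_name : Option String) (d : String) :
    (let s1 := if d ∈ (["lat", "lats", "latitudes", "latitude"] : List String) then "lat" else d
     let s2 := if s1 ∈ (["lon", "longitude", "longitudes"] : List String) then "lon" else s1
     if s2 ∈ (["pressure", "altitude"] : List String) then
       (match vert_dim_name with | none => "pstd" | some v => v)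
     else s2)
    = pvStep vert_dim_name d := by
  simp only [pvStep, List.mem_cons, List.not_mem_nil, or_false]
  by_cases h1 : d = "lat"
  · subst h1; cases vert_dim_name <;> rfl
  · by_cases h2 : d = "lats"
    · subst h2; cases vert_dim_name <;> rfl
    · by_cases h3 : d = "latitudes"
      · subst h3; cases vert_dim_name <;> rfl
      · by_cases h4 : d = "latitude"
        · subst h4; cases vert_dim_name <;> rfl
        · by_cases h5 : d = "lon"
          · subst h5; cases vert_dim_name <;> rfl
          · by_cases h6 : d = "longitude"
            · subst h6; cases vert_dim_name <;> rfl
            · by_cases h7 : d = "longitudes"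
              · subst h7; cases vert_dim_name <;> rfl
              · simp [h1, h2, h3, h4, h5, h6, h7]

-- ===== VERDICT (by name: the statement is the Claim_ definition above) =====
theorem replace_dims_spec : Claim_equal_replace_dims := by
  intro Ncvar_dim vert_dim_name _
  unfold Spec_replace_dims replace_dims replace_dims_alt pvSub
  have := pv_foldA vert_dim_name Ncvar_dim []
  simp only [List.length_nil, Nat.cast_zero, List.nil_append] at this
  rw [this]
  simp only [List.map_map]
  exact List.map_congr_left (fun d _ => (pv_point vert_dim_name d).symm)
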